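-- pv_equiv track=rewrite | github.com/choi-yh/coding_test | Greedy/BOJ_2875_대회_or_인턴.py | make_team
-- ===== SOURCE A (Python) =====
-- def make_team(n, m, k):
--     while k > 0:
--         if n // 2 >= m:
--             n -= 1
--             k -= 1
--         else:
--             m -= 1
--             k -= 1
--
--     return min(n // 2, m)
-- ===== SOURCE B (Python) =====
-- def make_team(n, m, k):
--     if k <= 0:
--         return min(n // 2, m)
--     return min(n // 2, m, (n + m - k) // 3)
-- ===== Notes on version B (the rewrite author's own statement) =====
-- stated objective: faster
-- what changed: Replaces the O(k) one-person-at-a-time removal loop by a closed-form formula min(n//2, m, (n+m-k)//3) (case k<=0 keeps min(n//2, m)).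
import Mathlib
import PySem

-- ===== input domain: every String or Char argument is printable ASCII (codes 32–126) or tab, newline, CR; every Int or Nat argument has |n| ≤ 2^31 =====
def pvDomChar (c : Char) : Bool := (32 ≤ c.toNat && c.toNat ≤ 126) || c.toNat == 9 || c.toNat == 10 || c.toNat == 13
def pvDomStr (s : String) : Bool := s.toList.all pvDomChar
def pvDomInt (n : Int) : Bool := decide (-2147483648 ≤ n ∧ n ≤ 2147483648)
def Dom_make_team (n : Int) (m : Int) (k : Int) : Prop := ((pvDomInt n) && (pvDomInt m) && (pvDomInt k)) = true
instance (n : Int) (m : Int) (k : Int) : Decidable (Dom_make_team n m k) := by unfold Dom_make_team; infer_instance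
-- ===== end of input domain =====

-- B replaces A's O(k) removal loop by a closed-form O(1) formula; return values are identical everywhere.

-- ===== PORT A =====
-- literal transliteration of A's while-loop: one person removed per iteration
def make_team (n : Int) (m : Int) (k : Int) : Int :=
  if 0 < k then
    if m ≤ PySem.Int.floordiv n 2 then make_team (n - 1) m (k - 1)
    else make_team n (m - 1) (k - 1)
  else
    min (PySem.Int.floordiv n 2) m
termination_by k.toNat
decreasing_by all_goals omega

-- ===== PORT B =====
def make_team_alt (n : Int) (m : Int) (k : Int) : Int :=
  if k ≤ 0 then min (PySem.Int.floordiv n 2) m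
  else min (min (PySem.Int.floordiv n 2) m) (PySem.Int.floordiv (n + m - k) 3)

-- ===== PRECONDITION & SPEC =====
def Spec_make_team (n : Int) (m : Int) (k : Int) (out : Int) : Prop := out = make_team_alt n m k
instance (n : Int) (m : Int) (k : Int) (out : Int) : Decidable (Spec_make_team n m k out) := by unfold Spec_make_team; infer_instance

-- ===== CLAIM (what is proved, stated in full; the proofs are below) =====
def Claim_equal_make_team : Prop := ∀ (n : Int) (m : Int) (k : Int), Dom_make_team n m k → Spec_make_team n m k (make_team n m k)

-- ===== LEMMAS AND PROOFS =====

-- one greedy step from the n-side preserves the closed form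
lemma alt_step_n (n m k : Int) (hk : 0 < k) (h : m ≤ PySem.Int.floordiv n 2) :
    make_team_alt (n - 1) m (k - 1) = make_team_alt n m k := by
  unfold make_team_alt
  rw [PySem.Int.floordiv_eq_ediv_of_pos (a := n) (by omega),
      PySem.Int.floordiv_eq_ediv_of_pos (a := n - 1) (by omega),
      PySem.Int.floordiv_eq_ediv_of_pos (a := n + m - k) (by omega),
      PySem.Int.floordiv_eq_ediv_of_pos (a := n - 1 + m - (k - 1)) (by omega)] at *
  split_ifs with h1 h2 <;> simp [Int.min_def] at * <;> split_ifs <;> omega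

-- one greedy step from the m-side preserves the closed form
lemma alt_step_m (n m k : Int) (hk : 0 < k) (h : PySem.Int.floordiv n 2 < m) :
    make_team_alt n (m - 1) (k - 1) = make_team_alt n m k := by
  unfold make_team_alt
  rw [PySem.Int.floordiv_eq_ediv_of_pos (a := n) (by omega),
      PySem.Int.floordiv_eq_ediv_of_pos (a := n + m - k) (by omega),
      PySem.Int.floordiv_eq_ediv_of_pos (a := n + (m - 1) - (k - 1)) (by omega)] at *
  split_ifs with h1 h2 <;> simp [Int.min_def] at * <;> split_ifs <;> omega

lemma make_team_eq_alt (n m k : Int) : make_team n m k = make_team_alt n m k := by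
  by_cases hk : 0 < k
  · induction hfuel : k.toNat using Nat.strong_induction_on generalizing n m k with
    | _ fuel ih =>
      rw [make_team]
      by_cases hk1 : 0 < k - 1
      · have ht : (k - 1).toNat < fuel := by omega
        split_ifs with hb
        · rw [ih _ ht _ _ _ hk1 rfl, alt_step_n n m k hk hb]
        · rw [ih _ ht _ _ _ hk1 rfl, alt_step_m n m k hk (by omega)]
      · have hk1' : k = 1 := by omega
        subst hk1'
        split_ifs with hb
        · rw [make_team, if_neg (by omega), ← alt_step_n n m 1 (by omega) hb,
              make_team_alt, if_pos (by omega)]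
        · rw [make_team, if_neg (by omega), ← alt_step_m n m 1 (by omega) (by omega),
              make_team_alt, if_pos (by omega)]
  · rw [make_team, if_neg hk]
    unfold make_team_alt
    rw [if_pos (by omega)]

-- ===== VERDICT (by name: the statement is the Claim_ definition above) =====
theorem make_team_spec : Claim_equal_make_team := by
  intro n m k _
  unfold Spec_make_team
  exact make_team_eq_alt n m k
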